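-- pv_equiv track=rewrite | github.com/maruyuki95/training | training/src/training/yukicoder/no345/python/Main.py | execute
-- ===== SOURCE A (Python) =====
-- def execute(arg):
--     ans = -1
--     cIndex = []
--     wIndex = []
--
--     for idx, s in enumerate(arg):
--         if(s == "c"):
--             cIndex.insert(0, idx)
--
--         if(s == "w"):
--             if(len(cIndex) > 0 and len(wIndex) > 0):
--                 wLast = wIndex[0]
--
--                 for cIdx in cIndex:
--                     if(cIdx > wLast):
--                         continue
--
--                     length = idx - cIdx + 1
--                     if(ans == -1 or ans > length):
--                         ans = length
--                         break
--
--             wIndex.insert(0, idx)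
--
--     return ans
-- ===== SOURCE B (Python) =====
-- def execute(arg):
--     # One O(n) pass: track the most recent 'c' index and the most recent 'c'
--     # index at or before the previous 'w'; each 'w' yields one candidate span.
--     ans = -1
--     lastC = None
--     cAtPrevW = None
--     for idx, s in enumerate(arg):
--         if s == "c":
--             lastC = idx
--         elif s == "w":
--             if cAtPrevW is not None:
--                 length = idx - cAtPrevW + 1
--                 if ans == -1 or length < ans:
--                     ans = length
--             cAtPrevW = lastC
--     return ans
-- ===== Notes on version B (the rewrite author's own statement) =====
-- stated objective: faster
-- what changed: Replaces the per-'w' inner scan over all collected 'c' indices with a single pass keeping only the latest 'c' index and the latest 'c' index at or before the previous 'w', giving one O(1) candidate per 'w'.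
import Mathlib
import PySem

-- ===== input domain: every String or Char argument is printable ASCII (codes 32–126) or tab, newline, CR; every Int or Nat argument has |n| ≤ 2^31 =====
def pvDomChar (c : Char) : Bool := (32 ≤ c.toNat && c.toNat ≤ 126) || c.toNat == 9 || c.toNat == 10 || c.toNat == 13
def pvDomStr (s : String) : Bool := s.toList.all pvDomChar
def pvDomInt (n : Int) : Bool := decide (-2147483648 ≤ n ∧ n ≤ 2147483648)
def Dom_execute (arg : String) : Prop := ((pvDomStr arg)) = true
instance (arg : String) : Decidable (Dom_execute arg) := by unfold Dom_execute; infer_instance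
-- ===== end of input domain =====

-- B replaces A's per-'w' inner scan over all 'c' indices with a single O(n) pass
-- keeping just two remembered indices; objective: faster (asymptotic).

-- ===== PORT A =====
-- inner 'for cIdx in cIndex' loop: skip cIdx > wLast; on first fit, maybe update ans and break
def aInner (idx wLast ans : Int) : List Int → Int
  | [] => ans
  | cIdx :: rest =>
    if cIdx > wLast then aInner idx wLast ans rest
    else
      let length := idx - cIdx + 1
      if ans = -1 ∨ ans > length then length   -- ans = length; break
      else aInner idx wLast ans rest

-- main 'for idx, s in enumerate(arg)' loop, state (ans, cIndex, wIndex)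
def aGo : List Char → Int → Int → List Int → List Int → Int
  | [], _, ans, _, _ => ans
  | s :: rest, idx, ans, cIndex, wIndex =>
    let cIndex := if s = 'c' then idx :: cIndex else cIndex
    if s = 'w' then
      let ans :=
        match wIndex with
        | [] => ans
        | wLast :: _ => if cIndex.length > 0 then aInner idx wLast ans cIndex else ans
      aGo rest (idx + 1) ans cIndex (idx :: wIndex)
    else aGo rest (idx + 1) ans cIndex wIndex

def execute (arg : String) : Int := aGo arg.toList 0 (-1) [] []

-- ===== PORT B =====
-- single pass, state (ans, lastC, cAtPrevW)
def bGo : List Char → Int → Int → Option Int → Option Int → Int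
  | [], _, ans, _, _ => ans
  | s :: rest, idx, ans, lastC, cAtPrevW =>
    if s = 'c' then bGo rest (idx + 1) ans (some idx) cAtPrevW
    else if s = 'w' then
      let ans :=
        match cAtPrevW with
        | none => ans
        | some c =>
          let length := idx - c + 1
          if ans = -1 ∨ length < ans then length else ans
      bGo rest (idx + 1) ans lastC lastC
    else bGo rest (idx + 1) ans lastC cAtPrevW

def execute_alt (arg : String) : Int := bGo arg.toList 0 (-1) none none

-- ===== PRECONDITION & SPEC =====
def Spec_execute (arg : String) (out : Int) : Prop := out = execute_alt arg
instance (arg : String) (out : Int) : Decidable (Spec_execute arg out) := by unfold Spec_execute; infer_instance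

-- ===== CLAIM (what is proved, stated in full; the proofs are below) =====
def Claim_equal_execute : Prop := ∀ (arg : String), Dom_execute arg → Spec_execute arg (execute arg)

-- ===== LEMMAS AND PROOFS =====

-- once ans is set and no larger candidate can beat it, the inner loop leaves ans unchanged
theorem aInner_noupdate (idx wLast ans : Int) (l : List Int)
    (h : ∀ c ∈ l, c ≤ wLast → ¬(ans = -1 ∨ ans > idx - c + 1)) :
    aInner idx wLast ans l = ans := by
  induction l with
  | nil => rfl
  | cons c rest ih =>
    simp only [aInner]
    split
    · exact ih fun c' hc' => h c' (List.mem_cons_of_mem _ hc')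
    · rename_i hle
      have hn := h c (List.mem_cons_self ..) (by omega)
      simp only [if_neg hn]
      exact ih fun c' hc' => h c' (List.mem_cons_of_mem _ hc')

-- characterisation of the inner loop on a strictly decreasing cIndex list
theorem aInner_eq (idx wLast ans : Int) (l : List Int)
    (hl : l.Pairwise (· > ·)) :
    aInner idx wLast ans l =
      match (l.filter (fun c => decide (c ≤ wLast))).head? with
      | none => ans
      | some c => if ans = -1 ∨ ans > idx - c + 1 then idx - c + 1 else ans := by
  induction l with
  | nil => rfl
  | cons c rest ih =>
    rcases List.pairwise_cons.mp hl with ⟨hc, hrest⟩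
    by_cases hgt : c > wLast
    · simp only [aInner, if_pos hgt]
      rw [List.filter_cons_of_neg (by simp; omega)]
      exact ih hrest
    · simp only [aInner, if_neg hgt]
      rw [List.filter_cons_of_pos (by simp; omega)]
      simp only [List.head?_cons]
      by_cases hcond : ans = -1 ∨ ans > idx - c + 1
      · simp [hcond]
      · simp only [if_neg hcond]
        rw [aInner_noupdate]
        intro c' hc' _hle hcond'
        have : c' < c := hc c' hc'
        rcases hcond' with h1 | h2
        · exact hcond (Or.inl h1)
        · exact hcond (Or.inr (by omega))

-- main invariant: the two loops agree when B's two remembered indices summarise A's lists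
theorem go_eq (chars : List Char) (idx ans : Int) (cIndex wIndex : List Int)
    (lastC cAtPrevW : Option Int)
    (h1 : lastC = cIndex.head?)
    (h2 : cIndex.Pairwise (· > ·))
    (h3 : ∀ c ∈ cIndex, c < idx)
    (h5 : ∀ w ∈ wIndex, w < idx)
    (h4 : cAtPrevW = match wIndex.head? with
          | none => none
          | some w => (cIndex.filter (fun c => decide (c ≤ w))).head?) :
    aGo chars idx ans cIndex wIndex = bGo chars idx ans lastC cAtPrevW := by
  induction chars generalizing idx ans cIndex wIndex lastC cAtPrevW with
  | nil => rfl
  | cons s rest ih =>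
    subst h1 h4
    by_cases hc : s = 'c'
    · have hw : ¬(s = 'w') := by subst hc; decide
      simp only [aGo, bGo, if_pos hc, if_neg hw]
      apply ih
      · simp
      · exact List.pairwise_cons.mpr ⟨fun c hcm => h3 c hcm, h2⟩
      · intro c hcm
        rcases List.mem_cons.mp hcm with h | h
        · omega
        · have := h3 c h; omega
      · intro w hw'; have := h5 w hw'; omega
      · cases hwi : wIndex with
        | nil => rfl
        | cons w ws =>
          have hwlt : w < idx := h5 w (by simp [hwi])
          simp only [List.head?_cons]
          rw [List.filter_cons_of_neg (by simp; omega)]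
    · simp only [aGo, bGo, if_neg hc]
      by_cases hw : s = 'w'
      · simp only [if_pos hw]
        have hans :
            (match wIndex with
             | [] => ans
             | wLast :: _ => if cIndex.length > 0 then aInner idx wLast ans cIndex else ans) =
            (match (match wIndex.head? with
                    | none => none
                    | some w => (cIndex.filter (fun c => decide (c ≤ w))).head?) with
             | none => ans
             | some c =>
               let length := idx - c + 1
               if ans = -1 ∨ length < ans then length else ans) := by
          cases wIndex with
          | nil => rfl
          | cons w ws =>
            simp only [List.head?_cons]
            by_cases hne : cIndex = []
            · subst hne; simp
            · have hlen : cIndex.length > 0 := List.length_pos_iff.mpr hne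
              simp only [if_pos hlen]
              rw [aInner_eq idx w ans cIndex h2]
        rw [hans]
        apply ih
        · rfl
        · exact h2
        · intro c hcm; have := h3 c hcm; omega
        · intro w hw'
          rcases List.mem_cons.mp hw' with h | h
          · omega
          · have := h5 w h; omega
        · simp only [List.head?_cons]
          rw [List.filter_eq_self.mpr]
          intro c hcm
          have := h3 c hcm
          simp; omega
      · simp only [if_neg hw]
        apply ih
        · rfl
        · exact h2
        · intro c hcm; have := h3 c hcm; omega
        · intro w hw'; have := h5 w hw'; omega
        · rfl

-- ===== VERDICT (by name: the statement is the Claim_ definition above) =====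
theorem execute_spec : Claim_equal_execute := by
  intro arg _
  show execute arg = execute_alt arg
  unfold execute execute_alt
  apply go_eq <;> simp
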